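-- pv_equiv track=rewrite | github.com/jvuhoang/DTI5125-Capstone | conversation_manager.py | detect_mentioned_diseases
-- ===== SOURCE A (Python) =====
-- _DISEASE_KEYWORD_MAP = {
--     # ── Alzheimer's Disease ───────────────────────────────────────────────────
--     "alzheimer's disease":          "Alzheimer's Disease",
--     "alzheimer disease":            "Alzheimer's Disease",
--     "memory disease":               "Alzheimer's Disease",
--     "alzheimer's":                  "Alzheimer's Disease",
--     "alzheimer":                    "Alzheimer's Disease",
--
--     # ── Parkinson's Disease ───────────────────────────────────────────────────
--     "parkinson's disease":          "Parkinson's Disease",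
--     "parkinson disease":            "Parkinson's Disease",
--     "parkinsonism":                 "Parkinson's Disease",
--     "parkinson's":                  "Parkinson's Disease",
--     "parkinson":                    "Parkinson's Disease",
--
--     # ── ALS / Huntington's ────────────────────────────────────────────────────
--     "amyotrophic lateral sclerosis":"ALS and Huntington's Disease",
--     "motor neuron disease":         "ALS and Huntington's Disease",
--     "lou gehrig's disease":         "ALS and Huntington's Disease",
--     "lou gehrig":                   "ALS and Huntington's Disease",
--     "als disease":                  "ALS and Huntington's Disease",
--     "huntington's disease":         "ALS and Huntington's Disease",
--     "huntington disease":           "ALS and Huntington's Disease",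
--     "huntington's":                 "ALS and Huntington's Disease",
--     "huntington":                   "ALS and Huntington's Disease",
--     "mnd":                          "ALS and Huntington's Disease",
--     "als":                          "ALS and Huntington's Disease",
--
--     # ── Dementia / MCI ────────────────────────────────────────────────────────
--     "mild cognitive impairment":    "Dementia and Mild Cognitive Impairment",
--     "cognitive impairment":         "Dementia and Mild Cognitive Impairment",
--     "vascular dementia":            "Dementia and Mild Cognitive Impairment",
--     "lewy body dementia":           "Dementia and Mild Cognitive Impairment",
--     "frontotemporal dementia":      "Dementia and Mild Cognitive Impairment",
--     "dementia":                     "Dementia and Mild Cognitive Impairment",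
--
--     # ── Stroke ────────────────────────────────────────────────────────────────
--     "cerebrovascular accident":     "Stroke",
--     "cerebrovascular":              "Stroke",
--     "brain attack":                 "Stroke",
--     "stroke":                       "Stroke",
-- }
--
-- def detect_mentioned_diseases(text: str) -> list:
--     """
--     Return the list of canonical disease labels explicitly named in the text.
--     Preserves insertion order, deduplicates.
--     """
--     t = text.lower()
--     seen   = set()
--     result = []
--     for kw, label in _DISEASE_KEYWORD_MAP.items():
--         if kw in t and label not in seen:
--             seen.add(label)
--             result.append(label)
--     return result
-- ===== SOURCE B (Python) =====
-- # B: hand-grouped label -> keywords table traversed by structural recursion,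
-- # building the result back-to-front; dedup is implicit in the grouping.
-- _LABEL_KEYWORDS = [
--     ("Alzheimer's Disease",
--      ["alzheimer's disease", "alzheimer disease", "memory disease",
--       "alzheimer's", "alzheimer"]),
--     ("Parkinson's Disease",
--      ["parkinson's disease", "parkinson disease", "parkinsonism",
--       "parkinson's", "parkinson"]),
--     ("ALS and Huntington's Disease",
--      ["amyotrophic lateral sclerosis", "motor neuron disease",
--       "lou gehrig's disease", "lou gehrig", "als disease",
--       "huntington's disease", "huntington disease", "huntington's",
--       "huntington", "mnd", "als"]),
--     ("Dementia and Mild Cognitive Impairment",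
--      ["mild cognitive impairment", "cognitive impairment", "vascular dementia",
--       "lewy body dementia", "frontotemporal dementia", "dementia"]),
--     ("Stroke",
--      ["cerebrovascular accident", "cerebrovascular", "brain attack", "stroke"]),
-- ]
--
--
-- def _collect(groups, t):
--     if not groups:
--         return []
--     label, kws = groups[0]
--     rest = _collect(groups[1:], t)
--     return [label] + rest if any(k in t for k in kws) else rest
--
--
-- def detect_mentioned_diseases(text: str) -> list:
--     return _collect(_LABEL_KEYWORDS, text.lower())
-- ===== Notes on version B (the rewrite author's own statement) =====
-- stated objective: simpler
-- what changed: Replaces the flat keyword loop with an explicit seen-set by a hand-grouped label->keywords table traversed by structural recursion, consing each label with any substring hit onto the recursively built tail, so deduplication is implicit in the grouping.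
import Mathlib
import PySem

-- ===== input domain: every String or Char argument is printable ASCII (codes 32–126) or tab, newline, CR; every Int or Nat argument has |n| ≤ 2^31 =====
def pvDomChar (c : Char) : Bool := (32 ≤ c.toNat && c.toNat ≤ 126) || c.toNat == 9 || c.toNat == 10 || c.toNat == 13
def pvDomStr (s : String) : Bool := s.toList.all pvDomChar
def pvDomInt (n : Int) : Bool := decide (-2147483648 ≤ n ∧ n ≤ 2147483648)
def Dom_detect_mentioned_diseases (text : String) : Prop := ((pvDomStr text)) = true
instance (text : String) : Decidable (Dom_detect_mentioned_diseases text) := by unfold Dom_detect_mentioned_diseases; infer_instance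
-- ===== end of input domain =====

-- B traverses a hand-grouped label -> keywords table by structural recursion, consing a label on
-- any substring hit; A's dedup set becomes implicit in the grouping (objective: simpler).


-- ===== PORT A =====
def diseaseKeywordMap : List (String × String) :=
  [ ("alzheimer's disease", "Alzheimer's Disease"),
    ("alzheimer disease", "Alzheimer's Disease"),
    ("memory disease", "Alzheimer's Disease"),
    ("alzheimer's", "Alzheimer's Disease"),
    ("alzheimer", "Alzheimer's Disease"),
    ("parkinson's disease", "Parkinson's Disease"),
    ("parkinson disease", "Parkinson's Disease"),
    ("parkinsonism", "Parkinson's Disease"),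
    ("parkinson's", "Parkinson's Disease"),
    ("parkinson", "Parkinson's Disease"),
    ("amyotrophic lateral sclerosis", "ALS and Huntington's Disease"),
    ("motor neuron disease", "ALS and Huntington's Disease"),
    ("lou gehrig's disease", "ALS and Huntington's Disease"),
    ("lou gehrig", "ALS and Huntington's Disease"),
    ("als disease", "ALS and Huntington's Disease"),
    ("huntington's disease", "ALS and Huntington's Disease"),
    ("huntington disease", "ALS and Huntington's Disease"),
    ("huntington's", "ALS and Huntington's Disease"),
    ("huntington", "ALS and Huntington's Disease"),
    ("mnd", "ALS and Huntington's Disease"),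
    ("als", "ALS and Huntington's Disease"),
    ("mild cognitive impairment", "Dementia and Mild Cognitive Impairment"),
    ("cognitive impairment", "Dementia and Mild Cognitive Impairment"),
    ("vascular dementia", "Dementia and Mild Cognitive Impairment"),
    ("lewy body dementia", "Dementia and Mild Cognitive Impairment"),
    ("frontotemporal dementia", "Dementia and Mild Cognitive Impairment"),
    ("dementia", "Dementia and Mild Cognitive Impairment"),
    ("cerebrovascular accident", "Stroke"),
    ("cerebrovascular", "Stroke"),
    ("brain attack", "Stroke"),
    ("stroke", "Stroke") ]

-- loop body of A: if kw in t and label not in seen: seen.add(label); result.append(label)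
def stepA (t : String) (st : PySem.Set String × List String) (p : String × String) :
    PySem.Set String × List String :=
  if PySem.Str.isIn p.1 t && !(PySem.Set.contains st.1 p.2)
  then (PySem.Set.add st.1 p.2, st.2 ++ [p.2]) else st

def detect_mentioned_diseases (text : String) : List String :=
  let t := PySem.Str.lower text
  (diseaseKeywordMap.foldl (stepA t) (PySem.Set.empty, [])).2

-- ===== PORT B =====
-- B's hand-grouped table: label paired with all its keywords, labels in the map's block order
def labelKeywords : List (String × List String) :=
  [ ("Alzheimer's Disease",
     ["alzheimer's disease", "alzheimer disease", "memory disease",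
      "alzheimer's", "alzheimer"]),
    ("Parkinson's Disease",
     ["parkinson's disease", "parkinson disease", "parkinsonism",
      "parkinson's", "parkinson"]),
    ("ALS and Huntington's Disease",
     ["amyotrophic lateral sclerosis", "motor neuron disease",
      "lou gehrig's disease", "lou gehrig", "als disease",
      "huntington's disease", "huntington disease", "huntington's",
      "huntington", "mnd", "als"]),
    ("Dementia and Mild Cognitive Impairment",
     ["mild cognitive impairment", "cognitive impairment", "vascular dementia",
      "lewy body dementia", "frontotemporal dementia", "dementia"]),
    ("Stroke",
     ["cerebrovascular accident", "cerebrovascular", "brain attack", "stroke"]) ]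

-- B's recursive _collect: cons the label onto the recursively collected tail on any hit
def collectB (groups : List (String × List String)) (t : String) : List String :=
  match groups with
  | [] => []
  | (label, kws) :: rest =>
    if kws.any (fun k => PySem.Str.isIn k t)
    then label :: collectB rest t
    else collectB rest t

def detect_mentioned_diseases_alt (text : String) : List String :=
  collectB labelKeywords (PySem.Str.lower text)

-- ===== PRECONDITION & SPEC =====
def Spec_detect_mentioned_diseases (text : String) (out : List String) : Prop := out = detect_mentioned_diseases_alt text
instance (text : String) (out : List String) : Decidable (Spec_detect_mentioned_diseases text out) := by unfold Spec_detect_mentioned_diseases; infer_instance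

-- ===== CLAIM (what is proved, stated in full; the proofs are below) =====
def Claim_equal_detect_mentioned_diseases : Prop := ∀ (text : String), Dom_detect_mentioned_diseases text → Spec_detect_mentioned_diseases text (detect_mentioned_diseases text)

-- ===== LEMMAS AND PROOFS =====

-- the net effect of A's loop on one contiguous block of keywords sharing the label L
def blockStep (t L : String) (kws : List String) (st : PySem.Set String × List String) :
    PySem.Set String × List String :=
  if (!(PySem.Set.contains st.1 L) && kws.any (fun kw => PySem.Str.isIn kw t))
  then (PySem.Set.add st.1 L, st.2 ++ [L]) else st

theorem stepA_block (t L : String) (kws : List String)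
    (st : PySem.Set String × List String) (rest : List (String × String)) :
    List.foldl (stepA t) st ((kws.map (fun kw => (kw, L))) ++ rest)
    = List.foldl (stepA t) (blockStep t L kws st) rest := by
  induction kws generalizing st with
  | nil => simp [blockStep]
  | cons kw kws ih =>
    simp only [List.map_cons, List.cons_append, List.foldl_cons]
    rw [ih]
    congr 1
    unfold blockStep stepA
    cases hc : PySem.Set.contains st.1 L with
    | true =>
      rw [PySem.Set.contains_iff] at hc
      simp [hc]
    | false =>
      have hc' : L ∉ st.1 := by simpa using hc
      cases hk : PySem.Chars.isIn kw.toList t.toList with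
      | false => simp [hk, hc']
      | true => simp [hk, hc']

theorem detect_mentioned_diseases_spec : Claim_equal_detect_mentioned_diseases := by
  unfold Claim_equal_detect_mentioned_diseases
  intro text _
  unfold Spec_detect_mentioned_diseases
  simp only [detect_mentioned_diseases, detect_mentioned_diseases_alt]
  have hmap : diseaseKeywordMap =
      (["alzheimer's disease", "alzheimer disease", "memory disease", "alzheimer's",
        "alzheimer"].map (fun kw => (kw, "Alzheimer's Disease"))) ++
      ((["parkinson's disease", "parkinson disease", "parkinsonism", "parkinson's",
        "parkinson"].map (fun kw => (kw, "Parkinson's Disease"))) ++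
      ((["amyotrophic lateral sclerosis", "motor neuron disease", "lou gehrig's disease",
        "lou gehrig", "als disease", "huntington's disease", "huntington disease",
        "huntington's", "huntington", "mnd", "als"].map
          (fun kw => (kw, "ALS and Huntington's Disease"))) ++
      ((["mild cognitive impairment", "cognitive impairment", "vascular dementia",
        "lewy body dementia", "frontotemporal dementia", "dementia"].map
          (fun kw => (kw, "Dementia and Mild Cognitive Impairment"))) ++
      ((["cerebrovascular accident", "cerebrovascular", "brain attack", "stroke"].map
          (fun kw => (kw, "Stroke"))) ++ ([]))))) := by rfl
  rw [hmap, stepA_block, stepA_block, stepA_block, stepA_block, stepA_block]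
  simp only [List.foldl_nil, blockStep, labelKeywords, collectB]
  generalize (["alzheimer's disease", "alzheimer disease", "memory disease", "alzheimer's",
      "alzheimer"].any (fun kw => PySem.Str.isIn kw (PySem.Str.lower text))) = b1
  generalize (["parkinson's disease", "parkinson disease", "parkinsonism", "parkinson's",
      "parkinson"].any (fun kw => PySem.Str.isIn kw (PySem.Str.lower text))) = b2
  generalize (["amyotrophic lateral sclerosis", "motor neuron disease", "lou gehrig's disease",
      "lou gehrig", "als disease", "huntington's disease", "huntington disease",
      "huntington's", "huntington", "mnd", "als"].any
        (fun kw => PySem.Str.isIn kw (PySem.Str.lower text))) = b3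
  generalize (["mild cognitive impairment", "cognitive impairment", "vascular dementia",
      "lewy body dementia", "frontotemporal dementia", "dementia"].any
        (fun kw => PySem.Str.isIn kw (PySem.Str.lower text))) = b4
  generalize (["cerebrovascular accident", "cerebrovascular", "brain attack", "stroke"].any
        (fun kw => PySem.Str.isIn kw (PySem.Str.lower text))) = b5
  revert b1 b2 b3 b4 b5
  decide
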